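-- pv_equiv track=rewrite | github.com/romanopritz/pagerduty-oncall-exporter | oncall_export.py | timetable_normalize
-- ===== SOURCE A (Python) =====
-- def timetable_normalize(timetable_dict):
--     timetable_list = []
--     cnt = 0
--
--     for item in sorted(timetable_dict):
--         timetable_list.append({item: timetable_dict[item]})
--         prev_item = next((x for x in timetable_list[cnt-1].keys()), None)
--
--         # If no primary contact for the timestamp, copy from previous record
--         if not 'primary' in timetable_list[cnt][item].keys():
--             timetable_list[cnt][item]['primary'] = \
--                     timetable_list[cnt-1][prev_item]['primary']
--
--         # If no secondary contact for the timestamp, copy from previous record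
--         if not 'secondary' in timetable_list[cnt][item].keys():
--             timetable_list[cnt][item]['secondary'] = \
--                     timetable_list[cnt-1][prev_item]['secondary']
--
--         cnt += 1
--
--     return timetable_list
-- ===== SOURCE B (Python) =====
-- def timetable_normalize(timetable_dict):
--     keys = sorted(timetable_dict)
--     values = [timetable_dict[k] for k in keys]
--     # forward-fill each field independently with the last value seen for it
--     for field in ('primary', 'secondary'):
--         last = None
--         for value in values:
--             if field in value:
--                 last = value[field]
--             else:
--                 value[field] = last
--     return [{k: v} for k, v in zip(keys, values)]
-- ===== Notes on version B (the rewrite author's own statement) =====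
-- stated objective: alternative
-- what changed: B replaces A's single pass that back-indexes into the built result list (timetable_list[cnt-1] with next(...) key extraction) by staged passes: sort keys once, then one independent forward-fill scan per field ('primary', 'secondary') carrying only that field's last seen value, then assemble the singleton-dict records in a final comprehension.
import Mathlib
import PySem

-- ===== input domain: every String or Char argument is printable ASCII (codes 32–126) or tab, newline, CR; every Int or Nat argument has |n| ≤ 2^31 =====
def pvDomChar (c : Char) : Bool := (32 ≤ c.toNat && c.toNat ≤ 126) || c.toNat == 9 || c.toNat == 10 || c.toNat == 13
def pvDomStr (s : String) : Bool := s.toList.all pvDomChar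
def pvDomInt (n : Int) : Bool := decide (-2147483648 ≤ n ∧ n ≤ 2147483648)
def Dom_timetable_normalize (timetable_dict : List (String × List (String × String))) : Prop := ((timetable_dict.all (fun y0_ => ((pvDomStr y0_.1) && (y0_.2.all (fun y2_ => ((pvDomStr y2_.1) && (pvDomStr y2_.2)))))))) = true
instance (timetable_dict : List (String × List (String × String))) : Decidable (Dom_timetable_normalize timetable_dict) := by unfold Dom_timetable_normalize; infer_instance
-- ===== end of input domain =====

-- B replaces A's single pass with back-indexing into the built list and next(...) key extraction by
-- staged per-field forward-fill scans over the sorted values, assembling the records at the end;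
-- equivalence is about the RETURN value (both Pythons fill the caller's inner dicts in place).

-- the Python argument is a dict of dicts: build it from the association lists (last value wins, first position kept)
def pvToDict (td : List (String × List (String × String))) : PySem.Dict String (PySem.Dict String String) :=
  PySem.Dict.ofList (td.map (fun p => (p.1, PySem.Dict.ofList p.2)))

-- ===== PORT A =====
-- A's records {item: value} are single-key dicts: ported as pairs (key, value); `next((x for x in r.keys()), None)`
-- is then r.1 and `timetable_list[cnt-1][prev_item]` is r.2 (exact: the record's only key is prev_item).
-- `timetable_list[cnt][item]['primary'] = …` mutates the LAST record in place: ported as dropLast ++ [updated]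
-- (exact: cnt is always the last index). The `.getD "primary" ""` defaults mark Python KeyErrors
-- (first sorted record lacking a contact) — excluded by Pre_timetable_normalize.
def tnA_loop (d : PySem.Dict String (PySem.Dict String String)) :
    List String → List (String × PySem.Dict String String) → Int → List (String × PySem.Dict String String)
  | [], tl, _ => tl
  | item :: rest, tl, cnt =>
    let tl1 := tl ++ [(item, d.getD item PySem.Dict.empty)]
    let prevRec := (PySem.List.pyGet? tl1 (cnt - 1)).getD ("", PySem.Dict.empty)
    let cur := (PySem.List.pyGet? tl1 cnt).getD ("", PySem.Dict.empty)
    let v1 := if cur.2.contains "primary" then cur.2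
              else cur.2.insert "primary" (prevRec.2.getD "primary" "")
    let v2 := if v1.contains "secondary" then v1
              else v1.insert "secondary" (prevRec.2.getD "secondary" "")
    tnA_loop d rest (tl1.dropLast ++ [(cur.1, v2)]) (cnt + 1)

def timetable_normalize (timetable_dict : List (String × List (String × String))) : List (List (String × List (String × String))) :=
  (tnA_loop (pvToDict timetable_dict)
    (PySem.List.sorted (pvToDict timetable_dict).keys (fun x => x) false) [] 0).map (fun p => [(p.1, p.2.items)])

-- ===== PORT B =====
-- one forward-fill pass for one field: `last` is Option String (Python None → none); `value[field] = last`
-- with last = None stores a non-string and is only reachable outside Pre_ (A raises KeyError there),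
-- so the `.getD ""` marker is never observed inside Pre_.
def tnFill (field : String) : List (PySem.Dict String String) → Option String → List (PySem.Dict String String)
  | [], _ => []
  | v :: rest, last =>
    if v.contains field then v :: tnFill field rest (some (v.getD field ""))
    else (v.insert field (last.getD "")) :: tnFill field rest last

def timetable_normalize_alt (timetable_dict : List (String × List (String × String))) : List (List (String × List (String × String))) :=
  let d := pvToDict timetable_dict
  let keys := PySem.List.sorted d.keys (fun x => x) false
  let values := keys.map (fun k => d.getD k PySem.Dict.empty)
  let values1 := tnFill "primary" values none
  let values2 := tnFill "secondary" values1 none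
  (keys.zip values2).map (fun p => [(p.1, p.2.items)])

-- ===== PRECONDITION & SPEC =====
-- Pre_ excludes exactly the inputs where A raises KeyError: a dict whose smallest key's
-- value lacks 'primary' or 'secondary' (A then reads the missing field from the record itself).
def Pre_timetable_normalize (timetable_dict : List (String × List (String × String))) : Prop :=
  ∀ p ∈ (pvToDict timetable_dict).items,
    (∀ q ∈ (pvToDict timetable_dict).items, ¬ (q.1.toList < p.1.toList)) →
    (p.2.contains "primary" && p.2.contains "secondary") = true
instance (timetable_dict : List (String × List (String × String))) : Decidable (Pre_timetable_normalize timetable_dict) := by unfold Pre_timetable_normalize; infer_instance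

def pvWitness_timetable_normalize : (List (String × List (String × String))) :=
  [("2020-01-01", [("primary", "alice"), ("secondary", "bob")]), ("2020-01-02", [])]

def Spec_timetable_normalize (timetable_dict : List (String × List (String × String))) (out : List (List (String × List (String × String)))) : Prop := out = timetable_normalize_alt timetable_dict
instance (timetable_dict : List (String × List (String × String))) (out : List (List (String × List (String × String)))) : Decidable (Spec_timetable_normalize timetable_dict out) := by unfold Spec_timetable_normalize; infer_instance

-- ===== CLAIM (what is proved, stated in full; the proofs are below) =====
def Claim_equal_timetable_normalize : Prop := ∀ (timetable_dict : List (String × List (String × String))), Dom_timetable_normalize timetable_dict → Pre_timetable_normalize timetable_dict → Spec_timetable_normalize timetable_dict (timetable_normalize timetable_dict)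

-- ===== LEMMAS AND PROOFS =====

-- proof-only fused pass (a previous-record accumulator): the bridge between A's back-indexing loop
-- and B's staged per-field fills
def tnB_loop : List (String × PySem.Dict String String) → Option (PySem.Dict String String) → List (String × PySem.Dict String String)
  | [], _ => []
  | (key, value) :: rest, prev =>
    let source := match prev with
      | some p => p
      | none => value
    let value := value.setdefault "primary" (source.getD "primary" "")
    let value := value.setdefault "secondary" (source.getD "secondary" "")
    (key, value) :: tnB_loop rest (some value)

lemma tn_loop_eq (d : PySem.Dict String (PySem.Dict String String)) (rest : List String) :
    ∀ (tl : List (String × PySem.Dict String String)) (k0 : String) (v0 : PySem.Dict String String),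
      v0.contains "primary" = true → v0.contains "secondary" = true →
      tnA_loop d rest (tl ++ [(k0, v0)]) ((tl.length : Int) + 1)
        = (tl ++ [(k0, v0)])
          ++ tnB_loop (rest.map (fun k => (k, d.getD k PySem.Dict.empty))) (some v0) := by
  induction rest with
  | nil => intro tl k0 v0 _ _; simp [tnA_loop, tnB_loop]
  | cons item rest ih =>
    intro tl k0 v0 hp hs
    set w := d.getD item PySem.Dict.empty with hw
    have hsplit : (tl ++ [(k0, v0)]) ++ [(item, w)] = tl ++ ((k0, v0) :: [(item, w)]) := by simp
    have hprev : PySem.List.pyGet? ((tl ++ [(k0, v0)]) ++ [(item, w)]) ((tl.length : Int) + 1 - 1)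
        = some (k0, v0) := by
      have : ((tl.length : Int) + 1 - 1) = (tl.length : Int) := by ring
      rw [this, hsplit, PySem.List.pyGet?_natCast]
      simp
    have hcur : PySem.List.pyGet? ((tl ++ [(k0, v0)]) ++ [(item, w)]) ((tl.length : Int) + 1)
        = some (item, w) := by
      have : ((tl.length : Int) + 1) = ((tl.length + 1 : Nat) : Int) := by push_cast; ring
      rw [this, hsplit, PySem.List.pyGet?_natCast]
      simp
    -- the filled value of this record, as A computes it
    set v1 := (if w.contains "primary" then w else w.insert "primary" (v0.getD "primary" "")) with hv1
    set v2 := (if v1.contains "secondary" then v1 else v1.insert "secondary" (v0.getD "secondary" "")) with hv2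
    have hv1p : v1.contains "primary" = true := by
      rw [hv1]; split
      · assumption
      · exact PySem.Dict.contains_insert_self _ _ _
    have hv2p : v2.contains "primary" = true := by
      rw [hv2]; split
      · exact hv1p
      · rw [PySem.Dict.contains_insert]; simp [hv1p]
    have hv2s : v2.contains "secondary" = true := by
      rw [hv2]; split
      · assumption
      · exact PySem.Dict.contains_insert_self _ _ _
    -- A's step
    have hA : tnA_loop d (item :: rest) (tl ++ [(k0, v0)]) ((tl.length : Int) + 1)
        = tnA_loop d rest ((tl ++ [(k0, v0)]) ++ [(item, v2)]) ((tl.length : Int) + 1 + 1) := by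
      rw [tnA_loop]
      simp only [hprev, hcur, Option.getD_some, ← hw, ← hv1, ← hv2, List.dropLast_concat]
    -- the fused pass's step value equals v2
    have hBval : w.setdefault "primary" (v0.getD "primary" "") = v1 := by
      rw [hv1]
      by_cases hc : w.contains "primary" = true
      · rw [PySem.Dict.setdefault_of_contains w _ hc]; simp [hc]
      · have hc' : w.contains "primary" = false := by simpa using hc
        rw [PySem.Dict.setdefault_of_not_contains w _ hc']
        simp [hc']
    have hBval2 : v1.setdefault "secondary" (v0.getD "secondary" "") = v2 := by
      rw [hv2]
      by_cases hc : v1.contains "secondary" = true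
      · rw [PySem.Dict.setdefault_of_contains v1 _ hc]; simp [hc]
      · have hc' : v1.contains "secondary" = false := by simpa using hc
        rw [PySem.Dict.setdefault_of_not_contains v1 _ hc']
        simp [hc']
    have hB : tnB_loop (((item :: rest)).map (fun k => (k, d.getD k PySem.Dict.empty))) (some v0)
        = (item, v2) :: tnB_loop (rest.map (fun k => (k, d.getD k PySem.Dict.empty))) (some v2) := by
      rw [List.map_cons]
      simp only [tnB_loop, ← hw, hBval, hBval2]
    rw [hA, hB]
    have := ih (tl ++ [(k0, v0)]) item v2 hv2p hv2s
    rw [List.length_append] at this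
    push_cast at this
    calc tnA_loop d rest ((tl ++ [(k0, v0)]) ++ [(item, v2)]) ((tl.length : Int) + 1 + 1)
        = ((tl ++ [(k0, v0)]) ++ [(item, v2)])
          ++ tnB_loop (rest.map (fun k => (k, d.getD k PySem.Dict.empty))) (some v2) := this
      _ = (tl ++ [(k0, v0)]) ++ ((item, v2) :: tnB_loop (rest.map (fun k => (k, d.getD k PySem.Dict.empty))) (some v2)) := by simp

-- the fused pass equals B's two staged per-field fills, zipped with the keys
lemma tnB_eq_fill (d : PySem.Dict String (PySem.Dict String String)) :
    ∀ (ks : List String) (v0 : PySem.Dict String String) (p s : String),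
      v0.contains "primary" = true → v0.contains "secondary" = true →
      v0.getD "primary" "" = p → v0.getD "secondary" "" = s →
      tnB_loop (ks.map (fun k => (k, d.getD k PySem.Dict.empty))) (some v0)
        = ks.zip (tnFill "secondary"
            (tnFill "primary" (ks.map (fun k => d.getD k PySem.Dict.empty)) (some p)) (some s)) := by
  intro ks
  induction ks with
  | nil => intro v0 p s _ _ _ _; simp [tnB_loop, tnFill]
  | cons k ks ih =>
    intro v0 p s hp hs hgp hgs
    set w := d.getD k PySem.Dict.empty with hw
    set w1 := w.setdefault "primary" p with hw1
    set p' := w1.getD "primary" "" with hp'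
    set v2 := w1.setdefault "secondary" s with hv2
    set s' := v2.getD "secondary" "" with hs'
    have hw1p : w1.contains "primary" = true := by
      rw [hw1, PySem.Dict.contains_setdefault]; simp
    have hv2p : v2.contains "primary" = true := by
      rw [hv2, PySem.Dict.contains_setdefault]; simp [hw1p]
    have hv2s : v2.contains "secondary" = true := by
      rw [hv2, PySem.Dict.contains_setdefault]; simp
    have hv2gp : v2.getD "primary" "" = p' := by
      rw [hv2, PySem.Dict.getD_eq_get?_getD, PySem.Dict.get?_setdefault_of_ne _ _ (by decide),
        ← PySem.Dict.getD_eq_get?_getD, hp']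
    have hfillP : tnFill "primary" ((k :: ks).map (fun k => d.getD k PySem.Dict.empty)) (some p)
        = w1 :: tnFill "primary" (ks.map (fun k => d.getD k PySem.Dict.empty)) (some p') := by
      rw [List.map_cons, tnFill, ← hw]
      by_cases hc : w.contains "primary" = true
      · rw [if_pos hc]
        have : w1 = w := by rw [hw1, PySem.Dict.setdefault_of_contains w _ hc]
        rw [this, hp', this]
      · have hc' : w.contains "primary" = false := by simpa using hc
        rw [if_neg (by simp [hc'])]
        have h1 : w1 = w.insert "primary" p := by
          rw [hw1, PySem.Dict.setdefault_of_not_contains w _ hc']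
        have h2 : p' = p := by rw [hp', h1, PySem.Dict.getD_insert_self]
        rw [h1, h2]
        simp
    have hfillS : tnFill "secondary"
          (w1 :: tnFill "primary" (ks.map (fun k => d.getD k PySem.Dict.empty)) (some p')) (some s)
        = v2 :: tnFill "secondary"
            (tnFill "primary" (ks.map (fun k => d.getD k PySem.Dict.empty)) (some p')) (some s') := by
      rw [tnFill]
      by_cases hc : w1.contains "secondary" = true
      · rw [if_pos hc]
        have : v2 = w1 := by rw [hv2, PySem.Dict.setdefault_of_contains w1 _ hc]
        rw [this, hs', this]
      · have hc' : w1.contains "secondary" = false := by simpa using hc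
        rw [if_neg (by simp [hc'])]
        have h1 : v2 = w1.insert "secondary" s := by
          rw [hv2, PySem.Dict.setdefault_of_not_contains w1 _ hc']
        have h2 : s' = s := by rw [hs', h1, PySem.Dict.getD_insert_self]
        rw [h1, h2]
        simp
    have hstep : tnB_loop ((k :: ks).map (fun k => (k, d.getD k PySem.Dict.empty))) (some v0)
        = (k, v2) :: tnB_loop (ks.map (fun k => (k, d.getD k PySem.Dict.empty))) (some v2) := by
      rw [List.map_cons]
      simp only [tnB_loop, ← hw, hgp, hgs, ← hw1, ← hv2]
    rw [hstep, hfillP, hfillS, List.zip_cons_cons, ih v2 p' s' hv2p hv2s hv2gp hs'.symm]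

-- ===== VERDICT (by name: the statement is the Claim_ definition above) =====
lemma tn_alt_unfold (td : List (String × List (String × String))) :
    timetable_normalize_alt td =
      ((PySem.List.sorted (pvToDict td).keys (fun x => x) false).zip
        (tnFill "secondary"
          (tnFill "primary"
            ((PySem.List.sorted (pvToDict td).keys (fun x => x) false).map
              (fun k => (pvToDict td).getD k PySem.Dict.empty)) none) none)).map
        (fun p => [(p.1, p.2.items)]) := rfl

theorem timetable_normalize_spec : Claim_equal_timetable_normalize := by
  intro td _ hpre
  unfold Spec_timetable_normalize timetable_normalize
  rw [tn_alt_unfold]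
  have hnd : (pvToDict td).keys.Nodup := PySem.Dict.nodup_keys_ofList _
  cases hks : PySem.List.sorted (pvToDict td).keys (fun x => x) false with
  | nil => simp [tnA_loop]
  | cons k rest =>
    set d := pvToDict td
    set v := d.getD k PySem.Dict.empty with hv
    -- k is the smallest key: Pre_ gives both contacts in its value
    have hkmem : k ∈ d.keys := by
      rw [← PySem.List.mem_sorted (key := fun x => x) (rev := false), hks]; exact List.mem_cons_self
    have hpmem : (k, v) ∈ d.items := by
      rw [PySem.Dict.items_eq_map_keys d hnd PySem.Dict.empty]
      exact List.mem_map.mpr ⟨k, hkmem, rfl⟩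
    have hmin : ∀ q ∈ d.items, ¬ (q.1.toList < (k, v).1.toList) := by
      intro q hq
      have hq1 : q.1 ∈ d.keys := PySem.Dict.mem_keys_of_mem_items d hq
      have hle : k ≤ q.1 := PySem.List.key_head_sorted_le _ _ hks q.1 hq1
      have : ¬ (q.1 < k) := not_lt.mpr hle
      simpa [String.lt_iff, String.toList] using this
    have hboth := hpre (k, v) hpmem hmin
    simp only [Bool.and_eq_true] at hboth
    obtain ⟨hp, hs⟩ := hboth
    -- first A iteration: prev record is the record itself (index -1); both fields present, so no fill
    have hfirst : tnA_loop d (k :: rest) [] 0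
        = tnA_loop d rest [(k, v)] 1 := by
      rw [tnA_loop]
      simp only [List.nil_append, ← hv]
      rw [show (0 : Int) - 1 = -1 from rfl, PySem.List.pyGet?_neg_one, PySem.List.pyGet?_zero]
      simp [hp, hs]
    have hmain := tn_loop_eq d rest [] k v hp hs
    simp only [List.nil_append, List.length_nil, Nat.cast_zero, zero_add] at hmain
    -- B's first iterations: v has both fields, so both fills keep it and update their last value
    have hBp : tnFill "primary" ((k :: rest).map (fun k => d.getD k PySem.Dict.empty)) none
        = v :: tnFill "primary" (rest.map (fun k => d.getD k PySem.Dict.empty)) (some (v.getD "primary" "")) := by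
      rw [List.map_cons, tnFill, ← hv, if_pos hp]
    have hBs : tnFill "secondary"
          (v :: tnFill "primary" (rest.map (fun k => d.getD k PySem.Dict.empty)) (some (v.getD "primary" ""))) none
        = v :: tnFill "secondary"
            (tnFill "primary" (rest.map (fun k => d.getD k PySem.Dict.empty)) (some (v.getD "primary" "")))
            (some (v.getD "secondary" "")) := by
      rw [tnFill, if_pos hs]
    rw [hfirst, hmain, hBp, hBs, List.zip_cons_cons,
      tnB_eq_fill d rest v (v.getD "primary" "") (v.getD "secondary" "") hp hs rfl rfl]
    simp
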